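-- pv_equiv track=rewrite | github.com/Jae-soon/Algorithmic | Programmers/Lv1/과일 장수.py | solution
-- ===== SOURCE A (Python) =====
-- def solution(k, m, score):
--     answer = 0
--     box = []
--     score = sorted(score, reverse=True)
--     for i in range(0, len(score) - 2, m):
--         box.append(score[i:i + m])
--
--     for i in box:
--         if len(i) == m:
--             answer += min(i) * len(i)
--
--     return answer
-- ===== SOURCE B (Python) =====
-- def solution(k, m, score):
--     # Sort descending once; the minimum of the j-th full box of m fruits is
--     # d[j*m + m - 1], so sum those positions directly -- no box lists, no min().
--     # (Fixes A's "len(score) - 2" range bound, which drops the last full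
--     # box(es) when m <= 2.)
--     d = sorted(score, reverse=True)
--     return m * sum(d[i] for i in range(m - 1, len(d), m))
-- ===== Notes on version B (the rewrite author's own statement) =====
-- stated objective: simpler
-- what changed: B replaces A's build-boxes-by-slicing-then-sum-min(box)*len(box) two-pass loop by a single index-arithmetic pass: after one descending sort, the minimum of each full box is the element at position j*m+m-1, so B sums those positions directly; B also uses the correct range bound len(score) where A's len(score)-2 drops the last full box(es) when m<=2.
-- intended difference: When m=1 (and the two smallest scores do not sum to 0) or m=2 with an even number of scores (and the smallest score is nonzero), A's loop bound range(0, len(score)-2, m) silently drops the last one or two full boxes and returns a too-small total, while B counts every full box of m fruits, which is the task's intended value. — e.g. on solution(3, 1, [1]): A returns 0, B returns 1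
import Mathlib
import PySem

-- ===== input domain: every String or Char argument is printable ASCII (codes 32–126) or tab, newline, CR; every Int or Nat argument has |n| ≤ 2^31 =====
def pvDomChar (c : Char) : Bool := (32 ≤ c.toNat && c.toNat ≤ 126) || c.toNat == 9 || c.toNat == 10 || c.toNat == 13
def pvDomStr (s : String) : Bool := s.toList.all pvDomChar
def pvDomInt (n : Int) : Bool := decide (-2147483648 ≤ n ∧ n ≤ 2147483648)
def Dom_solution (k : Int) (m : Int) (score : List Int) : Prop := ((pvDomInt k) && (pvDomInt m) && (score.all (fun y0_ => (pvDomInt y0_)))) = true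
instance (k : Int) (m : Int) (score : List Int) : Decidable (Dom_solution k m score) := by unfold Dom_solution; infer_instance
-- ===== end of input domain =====

-- B sums d[j*m+m-1] over the full boxes of the descending sort directly (no box
-- lists, no min), and counts every full box where A's 'len(score)-2' bound drops
-- the last one or two when m ≤ 2.  Return value only; neither program mutates.

-- ===== PORT A =====
def solution (k : Int) (m : Int) (score : List Int) : Int :=
  let score' := PySem.List.sorted score (fun x => x) true
  let box : List (List Int) :=
    (PySem.List.pyRange 0 ((score'.length : Int) - 2) m).foldl
      (fun acc i => acc ++ [PySem.List.slice score' (some i) (some (i + m))]) []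
  -- min(i) is guarded by len(i) == m (boxes exist only for m ≥ 1), so the
  -- .getD 0 default of min? is never used.
  box.foldl (fun answer i =>
      if ((i.length : Int)) = m then
        answer + ((PySem.List.min? i (fun y => y)).getD 0) * (i.length : Int)
      else answer) 0

-- ===== PORT B =====
def solution_alt (k : Int) (m : Int) (score : List Int) : Int :=
  let d := PySem.List.sorted score (fun x => x) true
  m * ((PySem.List.pyRange (m - 1) ((d.length : Int)) m).foldl
        (fun acc i => acc + PySem.List.pyGetD d i 0) 0)

-- ===== PRECONDITION & SPEC =====
-- Pre_ excludes exactly m = 0, where A's range(0, ..., 0) raises ValueError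
-- (and B's range raises too).
def Pre_solution (k : Int) (m : Int) (score : List Int) : Prop := m ≠ 0
instance (k : Int) (m : Int) (score : List Int) : Decidable (Pre_solution k m score) := by unfold Pre_solution; infer_instance
def pvWitness_solution : Int × Int × List Int := (4, 3, [1, 2, 3, 1, 2])

-- When m=1 (and the two smallest scores do not sum to 0) or m=2 with an even
-- number of scores (and the smallest score is nonzero), A's bound
-- range(0, len(score)-2, m) drops the last one or two full boxes and returns a
-- too-small total, while B counts every full box of m fruits, the intended value.
def D_solution (k : Int) (m : Int) (score : List Int) : Prop :=
  (m = 1 ∧ score ≠ [] ∧ ((PySem.List.sorted score (fun x => x)).take 2).sum ≠ 0) ∨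
  (m = 2 ∧ 2 ≤ score.length ∧ score.length % 2 = 0 ∧
    (PySem.List.sorted score (fun x => x)).headD 0 ≠ 0)
instance (k : Int) (m : Int) (score : List Int) : Decidable (D_solution k m score) := by unfold D_solution; infer_instance

def Spec_solution (k : Int) (m : Int) (score : List Int) (out : Int) : Prop := ¬ D_solution k m score → out = solution_alt k m score
instance (k : Int) (m : Int) (score : List Int) (out : Int) : Decidable (Spec_solution k m score out) := by unfold Spec_solution; infer_instance

def pvDiffWitness_solution : Int × Int × List Int := (3, 1, [1])
def pvDiffWitnessOut_solution : Int × Int := (0, 1)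

-- ===== CLAIM (what is proved, stated in full; the proofs are below) =====
def Claim_unchanged_solution : Prop := ∀ (k : Int) (m : Int) (score : List Int), Dom_solution k m score → Pre_solution k m score → Spec_solution k m score (solution k m score)
def Claim_changed_solution : Prop := Dom_solution (pvDiffWitness_solution.1) (pvDiffWitness_solution.2.1) (pvDiffWitness_solution.2.2) ∧ Pre_solution (pvDiffWitness_solution.1) (pvDiffWitness_solution.2.1) (pvDiffWitness_solution.2.2) ∧ D_solution (pvDiffWitness_solution.1) (pvDiffWitness_solution.2.1) (pvDiffWitness_solution.2.2) ∧ solution (pvDiffWitness_solution.1) (pvDiffWitness_solution.2.1) (pvDiffWitness_solution.2.2) = pvDiffWitnessOut_solution.1 ∧ solution_alt (pvDiffWitness_solution.1) (pvDiffWitness_solution.2.1) (pvDiffWitness_solution.2.2) = pvDiffWitnessOut_solution.2 ∧ pvDiffWitnessOut_solution.1 ≠ pvDiffWitnessOut_solution.2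
def Claim_exact_solution : Prop := ∀ (k : Int) (m : Int) (score : List Int), Dom_solution k m score → Pre_solution k m score → D_solution k m score → solution k m score ≠ solution_alt k m score

-- ===== LEMMAS AND PROOFS =====

-- the descending sort both ports start from
def sdesc (score : List Int) : List Int := PySem.List.sorted score (fun x => x) true
-- the summand: minimum of the j-th full box of m fruits
def gIdx (d : List Int) (M j : ℕ) : Int := d.getD (M * j + (M - 1)) 0
-- iteration count of A's loop range(0, n-2, m)
def cAof (n M : ℕ) : ℕ := if 2 < n then (n + M - 3) / M else 0

theorem sum_getD_range (l : List Int) :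
    ((List.range l.length).map (fun j => l.getD j 0)).sum = l.sum := by
  induction l with
  | nil => simp
  | cons x t ih =>
    simp only [List.length_cons, List.range_succ_eq_map, List.map_cons, List.map_map,
      List.sum_cons]
    simp only [Function.comp_def, List.getD_cons_zero, List.getD_cons_succ]
    rw [← ih]

theorem sum_getD_range_drop (l : List Int) (a : ℕ) (ha : a ≤ l.length) :
    ((List.range l.length).map (fun j => l.getD j 0)).sum
      = ((List.range a).map (fun j => l.getD j 0)).sum + (l.drop a).sum := by
  have h : l.length = a + (l.length - a) := by omega
  rw [h, List.range_add, List.map_append, List.sum_append, List.map_map]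
  congr 1
  have hlen : (l.drop a).length = l.length - a := by simp
  have hpt : ∀ x, l.getD (a + x) 0 = (l.drop a).getD x 0 := by
    intro x
    simp [List.getD_eq_getElem?_getD, List.getElem?_drop]
  calc ((List.range (l.length - a)).map ((fun j => l.getD j 0) ∘ (fun x => a + x))).sum
      = ((List.range (l.drop a).length).map (fun x => (l.drop a).getD x 0)).sum := by
        rw [hlen]; exact congrArg _ (List.map_congr_left (fun x _ => hpt x))
    _ = (l.drop a).sum := sum_getD_range _

theorem sasc_eq_reverse_sdesc (score : List Int) :
    PySem.List.sorted score (fun x => x) = (sdesc score).reverse := by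
  apply PySem.List.sorted_id_eq_of_perm_of_pairwise
  · exact ((sdesc score).reverse_perm).trans (PySem.List.sorted_perm _ _ _)
  · exact List.pairwise_reverse.mpr (PySem.List.sorted_pairwise_rev _ _)

theorem sum_ite_range (c e : ℕ) (f : ℕ → Int) :
    ((List.range c).map (fun j => if j < e then f j else 0)).sum
      = ((List.range (min c e)).map f).sum := by
  by_cases h : c ≤ e
  · rw [Nat.min_eq_left h]
    apply congrArg
    apply List.map_congr_left
    intro j hj
    rw [List.mem_range] at hj
    rw [if_pos (by omega)]
  · rw [Nat.min_eq_right (by omega)]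
    have hc : c = e + (c - e) := by omega
    rw [hc, List.range_add, List.map_append, List.sum_append, List.map_map]
    have h1 : ((List.range e).map (fun j => if j < e then f j else 0)) = (List.range e).map f := by
      apply List.map_congr_left
      intro j hj; rw [List.mem_range] at hj; rw [if_pos hj]
    have h2 : ((List.range (c - e)).map ((fun j => if j < e then f j else 0) ∘ (fun x => e + x))).sum = 0 := by
      apply List.sum_eq_zero
      intro x hx
      simp only [List.mem_map] at hx
      obtain ⟨y, _, rfl⟩ := hx
      simp only [Function.comp_def]
      rw [if_neg (by omega)]
    rw [h1, h2, add_zero]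

theorem min_foldl_desc (t : List Int) (x : Int)
    (h : List.Pairwise (fun a b : Int => b ≤ a) (x :: t)) :
    List.foldl min x t = (x :: t).getLast (List.cons_ne_nil x t) := by
  induction t generalizing x with
  | nil => simp
  | cons y t' ih =>
    have hxy : y ≤ x := (List.pairwise_cons.mp h).1 y (by simp)
    have ht : List.Pairwise (fun a b : Int => b ≤ a) (y :: t') := (List.pairwise_cons.mp h).2
    simp only [List.foldl_cons]
    rw [min_eq_right hxy, ih y ht]
    simp [List.getLast_cons]

theorem min?_desc (l : List Int) (hne : l ≠ [])
    (h : List.Pairwise (fun a b : Int => b ≤ a) l) :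
    PySem.List.min? l (fun y => y) = some (l.getLast hne) := by
  cases l with
  | nil => exact absurd rfl hne
  | cons x t => rw [PySem.List.min?_id_cons, min_foldl_desc t x h]

theorem b_char (k m : Int) (score : List Int) (M : ℕ) (hm : m = (M : Int)) (hM : 1 ≤ M) :
    solution_alt k m score =
      m * ((List.range ((sdesc score).length / M)).map (gIdx (sdesc score) M)).sum := by
  unfold solution_alt
  simp only []
  set d := PySem.List.sorted score (fun x => x) true with hd
  have hdd : sdesc score = d := rfl
  set n := d.length with hn
  rw [PySem.List.pyRange_of_pos _ _ (by omega : (0:ℤ) < m)]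
  have hnum : ((n : ℤ) - (m - 1) + m - 1) = (n : ℤ) := by ring
  have hcnt : (if (m - 1 : ℤ) < (n : ℤ) then (((n : ℤ) - (m - 1) + m - 1) / m).toNat else 0)
      = n / M := by
    by_cases h : (m - 1 : ℤ) < (n : ℤ)
    · rw [if_pos h, hnum, hm, ← Int.natCast_div, Int.toNat_natCast]
    · rw [if_neg h]
      have : n < M := by omega
      rw [Nat.div_eq_of_lt this]
  rw [hcnt, List.foldl_map, PySem.List.foldl_add, zero_add, hdd]
  refine congrArg (m * ·) (congrArg List.sum (List.map_congr_left ?_))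
  intro j hj
  have hidx : (m - 1 + m * (j : ℤ)) = ((M * j + (M - 1) : ℕ) : ℤ) := by
    subst hm; push_cast; omega
  rw [hidx, PySem.List.pyGetD_natCast]
  rfl

theorem a_char (k m : Int) (score : List Int) (M : ℕ) (hm : m = (M : Int)) (hM : 1 ≤ M) :
    solution k m score =
      ((List.range (min (cAof (sdesc score).length M) ((sdesc score).length / M))).map
        (fun j => m * gIdx (sdesc score) M j)).sum := by
  unfold solution
  simp only []
  set d := PySem.List.sorted score (fun x => x) true with hd
  have hdd : sdesc score = d := rfl
  set n := d.length with hn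
  rw [PySem.List.foldl_append_singleton_eq_map, List.nil_append]
  rw [PySem.List.pyRange_of_pos _ _ (by omega : (0:ℤ) < m)]
  have hcnt : (if (0:ℤ) < (n : ℤ) - 2 then (((n : ℤ) - 2 - 0 + m - 1) / m).toNat else 0)
      = cAof n M := by
    unfold cAof
    by_cases h : (0:ℤ) < (n : ℤ) - 2
    · rw [if_pos h, if_pos (by omega : 2 < n)]
      have hnum : ((n : ℤ) - 2 - 0 + m - 1) = ((n + M - 3 : ℕ) : ℤ) := by
        subst hm; omega
      rw [hnum, hm, ← Int.natCast_div, Int.toNat_natCast]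
    · rw [if_neg h, if_neg (by omega : ¬ 2 < n)]
  rw [hcnt, List.map_map, List.foldl_map]
  simp only [Function.comp_def]
  have hite : ∀ (c : Prop) (inst : Decidable c) (acc v : Int),
      (if c then acc + v else acc) = acc + (if c then v else 0) := by
    intro c inst acc v; split <;> simp
  simp only [hite]
  rw [PySem.List.foldl_add, zero_add]
  have hstep : ∀ j ∈ List.range (cAof n M),
      (if (((PySem.List.slice d (some ((0:ℤ) + m * (j:ℤ))) (some ((0:ℤ) + m * (j:ℤ) + m))).length : Int)) = m then
        ((PySem.List.min? (PySem.List.slice d (some ((0:ℤ) + m * (j:ℤ))) (some ((0:ℤ) + m * (j:ℤ) + m))) (fun y => y)).getD 0) * ((PySem.List.slice d (some ((0:ℤ) + m * (j:ℤ))) (some ((0:ℤ) + m * (j:ℤ) + m))).length : Int)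
      else 0)
      = (if j < n / M then m * gIdx d M j else 0) := by
    intro j hj
    have hi0 : ((0:ℤ) + m * (j:ℤ)) = ((M * j : ℕ) : ℤ) := by subst hm; push_cast; ring
    rw [hi0, hm, PySem.List.slice_natCast_add]
    set sl := List.take M (List.drop (M * j) d) with hsl
    have hlen : sl.length = min M (n - M * j) := by rw [hsl]; simp [← hn]
    have hcond : (((sl.length : ℕ) : ℤ) = ((M:ℕ):ℤ)) ↔ (M * j + M ≤ n) := by
      rw [Int.natCast_inj, hlen]
      omega
    have hcond2 : (M * j + M ≤ n) ↔ (j < n / M) := by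
      rw [Nat.lt_iff_add_one_le, Nat.le_div_iff_mul_le (by omega : 0 < M)]
      constructor <;> intro h' <;> nlinarith
    by_cases hc : M * j + M ≤ n
    · rw [if_pos (hcond.mpr hc), if_pos (hcond2.mp hc)]
      have hlenM : sl.length = M := by omega
      have hne : sl ≠ [] := List.ne_nil_of_length_pos (by omega)
      have hpw : List.Pairwise (fun a b : Int => b ≤ a) sl :=
        List.Pairwise.sublist ((List.take_sublist _ _).trans (List.drop_sublist _ _))
          (PySem.List.sorted_pairwise_rev score (fun x => x))
      rw [min?_desc sl hne hpw]
      have hidx : M * j + (M - 1) < n := by omega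
      have hgl : sl.getLast hne = d.getD (M * j + (M - 1)) 0 := by
        rw [List.getLast_eq_getElem, List.getD_eq_getElem d 0 hidx]
        calc sl[sl.length - 1] = (List.drop (M * j) d)[sl.length - 1]'(by
              rw [List.length_drop]; omega) := List.getElem_take
          _ = d[M * j + (sl.length - 1)]'(by omega) :=
              List.getElem_drop
          _ = d[M * j + (M - 1)]'hidx := by congr 1; omega
      rw [hgl, Option.getD_some, hlenM]
      unfold gIdx
      ring
    · rw [if_neg (fun h' => hc (hcond.mp h')), if_neg (fun h' => hc (hcond2.mpr h'))]
  rw [List.map_congr_left hstep, sum_ite_range, hdd]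

theorem foldl_no_full (m : Int) (hm : m < 0) (L : List (List Int)) (acc : Int) :
    L.foldl (fun answer i =>
      if ((i.length : Int)) = m then
        answer + ((PySem.List.min? i (fun y => y)).getD 0) * (i.length : Int)
      else answer) acc = acc := by
  induction L generalizing acc with
  | nil => rfl
  | cons x t ih =>
    rw [List.foldl_cons, if_neg (by have := Int.natCast_nonneg x.length; omega)]
    exact ih acc

theorem neg_case (k m : Int) (score : List Int) (hm : m < 0) :
    solution k m score = 0 ∧ solution_alt k m score = 0 := by
  constructor
  · unfold solution
    simp only []
    exact foldl_no_full m hm _ 0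
  · unfold solution_alt
    simp only []
    have h1 : ¬ (m = 0) := by omega
    have h2 : ¬ (0 < m) := by omega
    have h3 : ¬ (((score.length : ℕ) : ℤ) < m - 1) := by
      have := Int.natCast_nonneg score.length
      omega
    simp [PySem.List.pyRange, h1, h2, h3]

-- M = 1: B's sum is A's sum plus the two smallest scores
theorem diff_m1 (score : List Int) :
    ((List.range ((sdesc score).length / 1)).map (gIdx (sdesc score) 1)).sum
      = ((List.range (min (cAof (sdesc score).length 1) ((sdesc score).length / 1))).map
          (gIdx (sdesc score) 1)).sum
        + ((PySem.List.sorted score (fun x => x)).take 2).sum := by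
  set d := sdesc score with hd
  have hg : gIdx d 1 = fun j => d.getD j 0 := by
    funext j; unfold gIdx; norm_num
  have hca : min (cAof d.length 1) (d.length / 1) = d.length - 2 := by
    unfold cAof; split <;> omega
  rw [hca, hg, Nat.div_one, sum_getD_range_drop d (d.length - 2) (by omega)]
  congr 1
  rw [sasc_eq_reverse_sdesc, ← hd, List.take_reverse, List.sum_reverse]

-- M = 2, even length ≥ 2: B's sum is A's sum plus the smallest score
theorem diff_m2 (score : List Int) (h2 : 2 ≤ score.length) (he : score.length % 2 = 0) :
    ((List.range ((sdesc score).length / 2)).map (gIdx (sdesc score) 2)).sum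
      = ((List.range (min (cAof (sdesc score).length 2) ((sdesc score).length / 2))).map
          (gIdx (sdesc score) 2)).sum
        + (PySem.List.sorted score (fun x => x)).headD 0 := by
  set d := sdesc score with hd
  have hn : d.length = score.length := PySem.List.length_sorted _ _ _
  have hmin : min (cAof d.length 2) (d.length / 2) = d.length / 2 - 1 := by
    unfold cAof; split <;> omega
  have hq : d.length / 2 = (d.length / 2 - 1) + 1 := by omega
  rw [hmin, hq, List.range_succ, List.map_append, List.sum_append, List.map_cons,
    List.map_nil, List.sum_cons, List.sum_nil, add_zero]
  congr 1
  unfold gIdx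
  have hix : 2 * (d.length / 2 - 1) + (2 - 1) = d.length - 1 := by omega
  rw [hix, sasc_eq_reverse_sdesc, ← hd, List.headD_eq_head?, List.head?_reverse,
    List.getLast?_eq_getElem?, List.getD_eq_getElem?_getD]

theorem cb_le_ca (n M : ℕ) (h : 3 ≤ M) : n / M ≤ cAof n M := by
  unfold cAof
  split
  · exact Nat.div_le_div_right (by omega)
  · rw [Nat.div_eq_of_lt (by omega)]

-- ===== VERDICT (by name: the statement is the Claim_ definition above) =====
theorem solution_spec : Claim_unchanged_solution := by
  intro k m score _ hpre hnd
  unfold Pre_solution at hpre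
  by_cases hneg : m < 0
  · rw [(neg_case k m score hneg).1, (neg_case k m score hneg).2]
  · have hm1 : 1 ≤ m := by omega
    obtain ⟨M, hm⟩ : ∃ M : ℕ, m = (M : Int) := ⟨m.toNat, (Int.toNat_of_nonneg (by omega)).symm⟩
    have hMge : 1 ≤ M := by omega
    rw [a_char k m score M hm hMge, b_char k m score M hm hMge, List.sum_map_mul_left]
    refine congrArg (m * ·) ?_
    unfold D_solution at hnd
    rw [not_or] at hnd
    obtain ⟨hd1, hd2⟩ := hnd
    by_cases hM1 : M = 1
    · subst hM1
      rw [diff_m1 score]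
      have ht : ((PySem.List.sorted score (fun x => x)).take 2).sum = 0 := by
        by_cases hsc : score = []
        · subst hsc; rfl
        · by_contra hts
          exact hd1 ⟨by omega, hsc, hts⟩
      rw [ht, add_zero]
    · by_cases hM2 : M = 2
      · subst hM2
        have hn : (sdesc score).length = score.length := PySem.List.length_sorted _ _ _
        by_cases h2 : 2 ≤ score.length ∧ score.length % 2 = 0
        · rw [diff_m2 score h2.1 h2.2]
          have ht : (PySem.List.sorted score (fun x => x)).headD 0 = 0 := by
            by_contra hts
            exact hd2 ⟨by omega, h2.1, h2.2, hts⟩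
          rw [ht, add_zero]
        · have : min (cAof (sdesc score).length 2) ((sdesc score).length / 2)
              = (sdesc score).length / 2 := by
            unfold cAof; rw [hn]; split <;> omega
          rw [this]
      · have h3 : 3 ≤ M := by omega
        rw [Nat.min_eq_right (cb_le_ca _ _ h3)]

theorem solution_changed : Claim_changed_solution := by
  unfold Claim_changed_solution; decide

theorem solution_tight : Claim_exact_solution := by
  intro k m score _ hpre hD
  unfold D_solution at hD
  rcases hD with ⟨hm1, hne, hsum⟩ | ⟨hm2, h2, he, hhead⟩
  · subst hm1
    rw [a_char k 1 score 1 rfl le_rfl, b_char k 1 score 1 rfl le_rfl,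
      List.sum_map_mul_left, diff_m1 score]
    intro heq
    rw [one_mul, one_mul] at heq
    omega
  · subst hm2
    rw [a_char k 2 score 2 rfl (by omega), b_char k 2 score 2 rfl (by omega),
      List.sum_map_mul_left, diff_m2 score h2 he]
    intro heq
    omega
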